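-- pv_equiv track=rewrite | github.com/simonvbrae/AoC2020-sol | day18/day18_part1.py | find_last_unmatched_parens
-- ===== SOURCE A (Python) =====
-- def find_last_unmatched_parens(s):
--     conts_startindex = len(s)
--     amount_closing_parens = 0
--     amount_opening_parens = 0
--     while conts_startindex>0 and amount_closing_parens >= amount_opening_parens:
--         conts_startindex-=1
--         amount_closing_parens += int(s[conts_startindex] == ')')
--         amount_opening_parens += int(s[conts_startindex] == '(')
--     return conts_startindex
-- ===== SOURCE B (Python) =====
-- def find_last_unmatched_parens(s):
--     stack = []
--     for i, ch in enumerate(s):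
--         if ch == '(':
--             stack.append(i)
--         elif ch == ')':
--             if stack:
--                 stack.pop()
--     return stack[-1] if stack else 0
-- ===== Notes on version B (the rewrite author's own statement) =====
-- stated objective: idiomatic
-- what changed: A scans the string right-to-left maintaining two running counters of closing and opening parentheses; B makes a single left-to-right pass keeping a stack of the indices of currently-unmatched opening parentheses and returns the stack top, 0 if the stack is empty.
import Mathlib
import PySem

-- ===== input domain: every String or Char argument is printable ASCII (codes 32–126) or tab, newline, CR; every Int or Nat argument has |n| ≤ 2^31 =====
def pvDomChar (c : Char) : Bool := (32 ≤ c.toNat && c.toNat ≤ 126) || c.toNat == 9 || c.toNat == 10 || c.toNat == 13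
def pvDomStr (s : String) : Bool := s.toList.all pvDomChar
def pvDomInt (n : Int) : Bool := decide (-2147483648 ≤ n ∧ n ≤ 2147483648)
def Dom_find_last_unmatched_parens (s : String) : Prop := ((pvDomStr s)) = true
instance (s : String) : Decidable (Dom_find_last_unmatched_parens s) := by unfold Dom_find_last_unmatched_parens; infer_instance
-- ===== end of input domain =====

-- B replaces A's right-to-left counting scan by a single left-to-right pass with a stack
-- of '(' indices, returning the stack top (objective: idiomatic; same return value everywhere).

-- ===== PORT A =====
-- A's while loop: i counts down from len(s); c/o accumulate counts of ')' / '(' seen so far.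
-- s[i] is always in range here (0 ≤ i < len s inside the loop), so getD is exact.
def pvLoopA (cs : List Char) : Nat → Int → Int → Int
  | 0, _, _ => 0
  | j+1, c, o =>
    if c ≥ o then
      pvLoopA cs j (c + (if cs.getD j ' ' = ')' then 1 else 0))
                   (o + (if cs.getD j ' ' = '(' then 1 else 0))
    else (j+1 : Int)

def find_last_unmatched_parens (s : String) : Int :=
  pvLoopA s.toList s.toList.length 0 0

-- ===== PORT B =====
-- Source B's loop body: push index on '(', pop (dropLast) on ')' only when the stack is non-empty.
def pvStepB (st : List Int) (p : Int × Char) : List Int :=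
  if p.2 = '(' then st ++ [p.1]
  else if p.2 = ')' then (if st.isEmpty then st else st.dropLast)
  else st

def pvStackB (cs : List Char) : List Int :=
  (PySem.List.enumerate cs 0).foldl pvStepB []

def find_last_unmatched_parens_alt (s : String) : Int :=
  match (pvStackB s.toList).getLast? with
  | some i => i
  | none => 0

-- ===== PRECONDITION & SPEC =====
def Spec_find_last_unmatched_parens (s : String) (out : Int) : Prop := out = find_last_unmatched_parens_alt s
instance (s : String) (out : Int) : Decidable (Spec_find_last_unmatched_parens s out) := by unfold Spec_find_last_unmatched_parens; infer_instance

-- ===== CLAIM (what is proved, stated in full; the proofs are below) =====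
def Claim_equal_find_last_unmatched_parens : Prop := ∀ (s : String), Dom_find_last_unmatched_parens s → Spec_find_last_unmatched_parens s (find_last_unmatched_parens s)

-- ===== LEMMAS AND PROOFS =====

-- A's loop depends only on the difference c - o.
def pvLoopD (cs : List Char) : Nat → Int → Int
  | 0, _ => 0
  | j+1, d =>
    if 0 ≤ d then
      pvLoopD cs j (d + (if cs.getD j ' ' = ')' then 1 else 0)
                      - (if cs.getD j ' ' = '(' then 1 else 0))
    else (j+1 : Int)

lemma pvLoopA_eq_D (cs : List Char) : ∀ (i : Nat) (c o : Int),
    pvLoopA cs i c o = pvLoopD cs i (c - o) := by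
  intro i
  induction i with
  | zero => intro c o; simp [pvLoopA, pvLoopD]
  | succ j ih =>
    intro c o
    simp only [pvLoopA, pvLoopD]
    by_cases h : c ≥ o
    · rw [if_pos h, if_pos (show (0:Int) ≤ c - o by omega), ih]; ring_nf
    · rw [if_neg h, if_neg (show ¬ (0:Int) ≤ c - o by omega)]

-- the loop only reads indices below i, so a trailing element is invisible.
lemma pvLoopD_append (cs : List Char) (t : Char) : ∀ (i : Nat), i ≤ cs.length →
    ∀ d, pvLoopD (cs ++ [t]) i d = pvLoopD cs i d := by
  intro i
  induction i with
  | zero => intro _ _; simp [pvLoopD]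
  | succ j ih =>
    intro hij d
    have hj : j < cs.length := by omega
    have hg : (cs ++ [t]).getD j ' ' = cs.getD j ' ' := by
      simp [List.getD_eq_getElem?_getD, List.getElem?_append_left hj]
    simp only [pvLoopD, hg]
    split_ifs with h
    all_goals first | rfl | exact ih (by omega) _

lemma pvLoopD_neg (cs : List Char) : ∀ (i : Nat) (d : Int), d < 0 →
    pvLoopD cs i d = (i : Int) := by
  intro i d hd
  cases i with
  | zero => simp [pvLoopD]
  | succ j =>
    simp only [pvLoopD]
    rw [if_neg (show ¬ (0:Int) ≤ d by omega)]
    push_cast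
    ring

-- the d-th element from the top of B's stack (0 = top), default 0
def pvTop (st : List Int) (d : Nat) : Int := st.reverse.getD d 0

lemma pvTop_append_zero (st : List Int) (x : Int) : pvTop (st ++ [x]) 0 = x := by
  simp [pvTop]

lemma pvTop_append_succ (st : List Int) (x : Int) (d : Nat) :
    pvTop (st ++ [x]) (d+1) = pvTop st d := by
  simp [pvTop]

lemma pvTop_dropLast (st : List Int) (d : Nat) :
    pvTop st.dropLast d = pvTop st (d+1) := by
  unfold pvTop
  rw [show st.dropLast.reverse = st.reverse.tail by
    cases st using List.reverseRecOn with
    | nil => simp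
    | append_singleton ys y => simp]
  cases st.reverse with
  | nil => simp
  | cons a tl => simp

lemma pvStackB_append (cs : List Char) (ch : Char) :
    pvStackB (cs ++ [ch]) = pvStepB (pvStackB cs) ((cs.length : Int), ch) := by
  unfold pvStackB
  rw [PySem.List.enumerate_append]
  simp [PySem.List.enumerate, List.foldl_append]

-- main invariant: A's difference-scan with surplus d returns the (d+1)-th unmatched '(' from the right.
lemma pvMain (cs : List Char) : ∀ (d : Nat),
    pvLoopD cs cs.length (d : Int) = pvTop (pvStackB cs) d := by
  induction cs using List.reverseRecOn with
  | nil => intro d; simp [pvLoopD, pvStackB, PySem.List.enumerate, pvTop]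
  | append_singleton cs ch ih =>
    intro d
    have hlen : (cs ++ [ch]).length = cs.length + 1 := by simp
    have hg : (cs ++ [ch]).getD cs.length ' ' = ch := by
      simp [List.getD_eq_getElem?_getD]
    rw [hlen]
    simp only [pvLoopD, hg]
    rw [if_pos (Int.natCast_nonneg d),
        pvLoopD_append cs ch cs.length (le_refl _), pvStackB_append]
    by_cases hop : ch = '('
    · subst hop
      have hstep : pvStepB (pvStackB cs) ((cs.length : Int), '(') =
          pvStackB cs ++ [(cs.length : Int)] := by simp [pvStepB]
      rw [hstep, show (if ('(' : Char) = ')' then (1:Int) else 0) = 0 by decide,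
          show (if ('(' : Char) = '(' then (1:Int) else 0) = 1 by decide]
      cases d with
      | zero =>
        rw [show ((0:Nat):Int) + 0 - 1 = (-1:Int) by norm_num,
            pvLoopD_neg cs cs.length (-1) (by norm_num), pvTop_append_zero]
      | succ e =>
        rw [show (((e+1:Nat)):Int) + 0 - 1 = ((e:Nat):Int) by push_cast; ring,
            ih e, pvTop_append_succ]
    · by_cases hcl : ch = ')'
      · subst hcl
        have hstep : pvStepB (pvStackB cs) ((cs.length : Int), ')') =
            (if (pvStackB cs).isEmpty then pvStackB cs else (pvStackB cs).dropLast) := by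
          simp [pvStepB]
        rw [hstep, show (if (')' : Char) = ')' then (1:Int) else 0) = 1 by decide,
            show (if (')' : Char) = '(' then (1:Int) else 0) = 0 by decide,
            show ((d:Nat):Int) + 1 - 0 = ((d+1:Nat):Int) by push_cast; ring, ih (d+1)]
        by_cases hemp : (pvStackB cs).isEmpty
        · rw [if_pos hemp]
          rw [List.isEmpty_iff] at hemp
          simp [hemp, pvTop]
        · rw [if_neg hemp, pvTop_dropLast]
      · have hstep : pvStepB (pvStackB cs) ((cs.length : Int), ch) = pvStackB cs := by
          simp [pvStepB, hop, hcl]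
        rw [hstep, show (if ch = ')' then (1:Int) else 0) = 0 by simp [hcl],
            show (if ch = '(' then (1:Int) else 0) = 0 by simp [hop],
            show ((d:Nat):Int) + 0 - 0 = ((d:Nat):Int) by ring, ih d]

lemma pvTop_zero_getLast (st : List Int) :
    pvTop st 0 = (match st.getLast? with | some i => i | none => 0) := by
  unfold pvTop
  rw [← List.head?_reverse]
  cases st.reverse with
  | nil => simp
  | cons a tl => simp

-- ===== VERDICT (by name: the statement is the Claim_ definition above) =====
theorem find_last_unmatched_parens_spec : Claim_equal_find_last_unmatched_parens := by
  intro s _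
  unfold Spec_find_last_unmatched_parens find_last_unmatched_parens find_last_unmatched_parens_alt
  rw [pvLoopA_eq_D, show (0:Int) - 0 = ((0:Nat):Int) by norm_num, pvMain s.toList 0,
      pvTop_zero_getLast]
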